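-- pv_equiv track=rewrite | github.com/Gautzilla/AdventOfCode | python_AoC/2024/12/2024_12.py | nb_sides
-- ===== SOURCE A (Python) =====
-- def is_neighbour_fence(f1, f2):
-- 	neighbours = {
-- 		"horizontal": lambda x1,y1,x2,y2: y1 == y2 and abs(x1 - x2) == 1,
-- 		"vertical": lambda x1,y1,x2,y2: x1 == x2 and abs(y1 - y2) == 1
-- 	}
-- 	x1,y1,d1 = f1
-- 	x2,y2,d2 = f2
-- 	d = "horizontal" if abs(d1[1]) == 1 else "vertical"
-- 	return d1 == d2 and neighbours[d](x1,y1,x2,y2)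
--
-- def find_fence(x,y,direction, fences):
-- 	fence = set(f for f in fences if f[-1] == direction)
-- 	to_visit = {(x, y, direction)}
-- 	same_fence = set()
--
-- 	while to_visit:
-- 		fence_part = to_visit.pop()
-- 		fence.remove(fence_part)
-- 		same_fence.add(fence_part)
-- 		for neighbour_fence in (f for f in fence if is_neighbour_fence(fence_part, f)):
-- 			to_visit.add(neighbour_fence)
-- 	return same_fence
--
-- def nb_sides(fences: set[int,int,tuple[int,int]]) -> int:
-- 	fences = fences.copy()
-- 	nb_sides = 0
-- 	while(fences):
-- 		fence = find_fence(*list(fences)[0], fences)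
-- 		fences -= fence
-- 		nb_sides += 1
-- 	return nb_sides
-- ===== SOURCE B (Python) =====
-- def nb_sides(fences):
-- 	s = set(fences)
-- 	count = 0
-- 	for x, y, d in s:
-- 		succ = (x + 1, y, d) if abs(d[1]) == 1 else (x, y + 1, d)
-- 		if succ not in s:
-- 			count += 1
-- 	return count
-- ===== Notes on version B (the rewrite author's own statement) =====
-- stated objective: faster
-- what changed: A repeatedly runs a quadratic BFS flood-fill to peel off one connected run of fence segments at a time; B replaces the whole loop nest by a single hash-set pass that counts segments whose successor segment (next cell in the run's direction) is absent, which equals the number of maximal runs.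
import Mathlib
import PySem

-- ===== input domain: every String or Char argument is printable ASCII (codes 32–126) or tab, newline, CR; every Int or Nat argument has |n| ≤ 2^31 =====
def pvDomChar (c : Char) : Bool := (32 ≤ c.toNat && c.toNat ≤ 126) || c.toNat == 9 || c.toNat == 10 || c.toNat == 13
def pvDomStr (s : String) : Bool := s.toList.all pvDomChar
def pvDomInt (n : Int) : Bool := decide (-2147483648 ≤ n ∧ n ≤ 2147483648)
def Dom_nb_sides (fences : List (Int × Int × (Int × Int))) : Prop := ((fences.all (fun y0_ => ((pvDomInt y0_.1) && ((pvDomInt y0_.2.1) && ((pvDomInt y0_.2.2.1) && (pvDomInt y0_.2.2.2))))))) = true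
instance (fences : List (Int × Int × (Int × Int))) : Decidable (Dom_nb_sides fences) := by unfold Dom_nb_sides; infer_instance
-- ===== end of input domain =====

-- B counts, in one pass over the set, the segments whose successor segment is absent (one per
-- maximal run), instead of A's repeated BFS flood-fill peeling off one run at a time.
-- The input list stands for a Python set: both ports read it through PySem.Set.ofList, and the
-- result (a count of connected components) is independent of any iteration order, so Python's
-- hash order ('list(fences)[0]', 'to_visit.pop()') is modelled by list order without loss.

-- ===== PORT A =====
def pvIsNeighbourFence (f1 f2 : Int × Int × (Int × Int)) : Bool :=
  -- d = "horizontal" if abs(d1[1]) == 1 else "vertical"; d1 == d2 and neighbours[d](x1,y1,x2,y2)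
  (f1.2.2 == f2.2.2) &&
    (if f1.2.2.2.natAbs == 1
      then (f1.2.1 == f2.2.1) && ((f1.1 - f2.1).natAbs == 1)
      else (f1.1 == f2.1) && ((f1.2.1 - f2.2.1).natAbs == 1))

-- the while-loop of find_fence; fuel = |fence| + 1 suffices since every iteration removes the
-- popped element from fence (proved below).  'fence.remove(fence_part)' is Set.discard: the
-- popped element is always a member (to_visit ⊆ fence is a loop invariant), so no KeyError.
def pvFindLoop : Nat → PySem.Set (Int × Int × (Int × Int)) → PySem.Set (Int × Int × (Int × Int)) →
    PySem.Set (Int × Int × (Int × Int)) → PySem.Set (Int × Int × (Int × Int))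
  | 0, _, _, sf => sf
  | _ + 1, _, [], sf => sf
  | fuel + 1, fence, p :: rest, sf =>
      -- fence.remove(p); same_fence.add(p); for f in fence if is_neighbour_fence(p, f): to_visit.add(f)
      pvFindLoop fuel (PySem.Set.discard fence p)
        (PySem.Set.update rest ((PySem.Set.discard fence p).filter (fun g => pvIsNeighbourFence p g)))
        (PySem.Set.add sf p)

def pvFindFence (x y : Int) (direction : Int × Int)
    (fences : PySem.Set (Int × Int × (Int × Int))) : PySem.Set (Int × Int × (Int × Int)) :=
  -- fence = set(f for f in fences if f[-1] == direction); to_visit = {(x,y,direction)}; same_fence = set()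
  let fence := PySem.Set.ofList (fences.filter (fun f => f.2.2 == direction))
  pvFindLoop (fence.length + 1) fence [(x, y, direction)] []

-- the while-loop of nb_sides; fuel = |fences| + 1 suffices since every iteration removes at
-- least the chosen first element (proved below)
def pvNbLoop : Nat → PySem.Set (Int × Int × (Int × Int)) → Int
  | 0, _ => 0
  | _ + 1, [] => 0
  | fuel + 1, f :: rest =>
      1 + pvNbLoop fuel (PySem.Set.diff (f :: rest) (pvFindFence f.1 f.2.1 f.2.2 (f :: rest)))

def nb_sides (fences : List (Int × Int × (Int × Int))) : Int :=
  let s := PySem.Set.ofList fences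
  pvNbLoop (s.length + 1) s

-- ===== PORT B =====
-- succ = (x+1, y, d) if abs(d[1]) == 1 else (x, y+1, d)
def pvSucc (f : Int × Int × (Int × Int)) : Int × Int × (Int × Int) :=
  if f.2.2.2.natAbs == 1 then (f.1 + 1, f.2.1, f.2.2) else (f.1, f.2.1 + 1, f.2.2)

def nb_sides_alt (fences : List (Int × Int × (Int × Int))) : Int :=
  let s := PySem.Set.ofList fences
  s.foldl (fun count f => if !(PySem.Set.contains s (pvSucc f)) then count + 1 else count) 0

-- ===== PRECONDITION & SPEC =====
def Spec_nb_sides (fences : List (Int × Int × (Int × Int))) (out : Int) : Prop := out = nb_sides_alt fences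
instance (fences : List (Int × Int × (Int × Int))) (out : Int) : Decidable (Spec_nb_sides fences out) := by unfold Spec_nb_sides; infer_instance

-- ===== CLAIM (what is proved, stated in full; the proofs are below) =====
def Claim_equal_nb_sides : Prop := ∀ (fences : List (Int × Int × (Int × Int))), Dom_nb_sides fences → Spec_nb_sides fences (nb_sides fences)

-- ===== LEMMAS AND PROOFS =====

-- Coordinates along (ξ) and across (η) a run: adjacency keeps η and moves ξ by one, so a
-- connected component of fences lives on one line {η = const} and is a set of integers ξ.
def pvXi (f : Int × Int × (Int × Int)) : Int :=
  if f.2.2.2.natAbs = 1 then f.1 else f.2.1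

def pvEta (f : Int × Int × (Int × Int)) : Int × (Int × Int) :=
  (if f.2.2.2.natAbs = 1 then f.2.1 else f.1, f.2.2)

lemma pvEta_xi_inj {f g : Int × Int × (Int × Int)}
    (hη : pvEta f = pvEta g) (hξ : pvXi f = pvXi g) : f = g := by
  obtain ⟨x1, y1, dx1, dy1⟩ := f
  obtain ⟨x2, y2, dx2, dy2⟩ := g
  simp [pvEta, Prod.ext_iff] at hη
  obtain ⟨h1, hdx, hdy⟩ := hη
  subst hdx; subst hdy
  simp [pvXi] at hξ
  by_cases h : dy1.natAbs = 1 <;> simp [h] at h1 hξ <;> simp [h1, hξ]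

lemma pvAdj_iff (f g : Int × Int × (Int × Int)) :
    pvIsNeighbourFence f g = true ↔
      pvEta f = pvEta g ∧ (pvXi g = pvXi f + 1 ∨ pvXi g = pvXi f - 1) := by
  obtain ⟨x1, y1, dx1, dy1⟩ := f
  obtain ⟨x2, y2, dx2, dy2⟩ := g
  simp [pvIsNeighbourFence, pvEta, pvXi, Prod.ext_iff]
  constructor
  · rintro ⟨⟨hdx, hdy⟩, h⟩
    subst hdx; subst hdy
    by_cases hb : dy1.natAbs = 1 <;> simp [hb] at h ⊢ <;> omega
  · rintro ⟨⟨h1, hdx, hdy⟩, h2⟩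
    subst hdx; subst hdy
    by_cases hb : dy1.natAbs = 1 <;> simp [hb] at h1 h2 ⊢ <;> omega

lemma pvSucc_iff (f g : Int × Int × (Int × Int)) :
    g = pvSucc f ↔ pvEta g = pvEta f ∧ pvXi g = pvXi f + 1 := by
  constructor
  · rintro rfl
    obtain ⟨x, y, dx, dy⟩ := f
    by_cases h : dy.natAbs = 1 <;> simp [pvSucc, pvEta, pvXi, h]
  · rintro ⟨hη, hξ⟩
    apply pvEta_xi_inj (g := pvSucc f)
    · rw [hη]
      obtain ⟨x, y, dx, dy⟩ := f
      by_cases h : dy.natAbs = 1 <;> simp [pvSucc, pvEta, h]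
    · rw [hξ]
      obtain ⟨x, y, dx, dy⟩ := f
      by_cases h : dy.natAbs = 1 <;> simp [pvSucc, pvXi, h]

lemma pvAdj_symm {f g : Int × Int × (Int × Int)} (h : pvIsNeighbourFence f g = true) :
    pvIsNeighbourFence g f = true := by
  rw [pvAdj_iff] at h ⊢
  obtain ⟨hη, hξ⟩ := h
  exact ⟨hη.symm, by omega⟩

lemma pvAdj_ne {f g : Int × Int × (Int × Int)} (h : pvIsNeighbourFence f g = true) : g ≠ f := by
  rw [pvAdj_iff] at h
  rintro rfl
  omega

-- the step relation inside a list S of fences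
def pvStep (S : List (Int × Int × (Int × Int))) (a b : Int × Int × (Int × Int)) : Prop :=
  a ∈ S ∧ b ∈ S ∧ pvIsNeighbourFence a b = true

lemma pvReach_eta {S : List (Int × Int × (Int × Int))} {a b : Int × Int × (Int × Int)}
    (h : Relation.ReflTransGen (pvStep S) a b) : pvEta b = pvEta a := by
  induction h with
  | refl => rfl
  | tail _ hstep ih =>
      have := (pvAdj_iff _ _).1 hstep.2.2
      rw [this.1] at ih; exact ih

lemma pvReach_symm {S : List (Int × Int × (Int × Int))} {a b : Int × Int × (Int × Int)}
    (h : Relation.ReflTransGen (pvStep S) a b) : Relation.ReflTransGen (pvStep S) b a := by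
  induction h with
  | refl => exact Relation.ReflTransGen.refl
  | tail _ hstep ih =>
      exact Relation.ReflTransGen.trans
        (Relation.ReflTransGen.single ⟨hstep.2.1, hstep.1, pvAdj_symm hstep.2.2⟩) ih

-- discrete intermediate-value property of a chain of ±1 steps
lemma pvReach_ivt {S : List (Int × Int × (Int × Int))} {a b : Int × Int × (Int × Int)}
    (h : Relation.ReflTransGen (pvStep S) a b) :
    ∀ v : Int, ((pvXi a ≤ v ∧ v ≤ pvXi b) ∨ (pvXi b ≤ v ∧ v ≤ pvXi a)) → a ∈ S →
      ∃ c, c ∈ S ∧ pvEta c = pvEta b ∧ pvXi c = v := by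
  induction h using Relation.ReflTransGen.head_induction_on with
  | refl =>
      intro v hv hb
      exact ⟨b, hb, rfl, by omega⟩
  | @head a a' hstep htail ih =>
      intro v hv ha
      have hadj := (pvAdj_iff _ _).1 hstep.2.2
      by_cases hcase : (pvXi a' ≤ v ∧ v ≤ pvXi b) ∨ (pvXi b ≤ v ∧ v ≤ pvXi a')
      · exact ih v hcase hstep.2.1
      · have hva : v = pvXi a := by omega
        exact ⟨a, ha, (pvReach_eta (Relation.ReflTransGen.head hstep htail)).symm, hva.symm⟩

-- every element of a nonempty list has a ξ-maximal companion
lemma pvExists_max (l : List (Int × Int × (Int × Int))) (hne : l ≠ []) :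
    ∃ m ∈ l, ∀ x ∈ l, pvXi x ≤ pvXi m := by
  induction l with
  | nil => exact absurd rfl hne
  | cons a t ih =>
      cases t with
      | nil => exact ⟨a, by simp, by simp⟩
      | cons b u =>
          obtain ⟨m, hm, hmax⟩ := ih (by simp)
          by_cases hc : pvXi a ≤ pvXi m
          · refine ⟨m, List.mem_cons_of_mem _ hm, ?_⟩
            intro x hx
            rcases List.mem_cons.1 hx with rfl | hx
            · exact hc
            · exact hmax x hx
          · refine ⟨a, List.mem_cons_self, ?_⟩
            intro x hx
            rcases List.mem_cons.1 hx with rfl | hx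
            · exact le_refl _
            · exact le_trans (hmax x hx) (le_of_not_ge hc)

-- a Nodup list with exactly one element satisfying p has countP p = 1
lemma pvCountP_eq_one {l : List (Int × Int × (Int × Int))} {p : (Int × Int × (Int × Int)) → Bool}
    {m : Int × Int × (Int × Int)} (hnd : l.Nodup) (hm : m ∈ l) (hpm : p m = true)
    (huniq : ∀ x ∈ l, p x = true → x = m) : l.countP p = 1 := by
  induction l with
  | nil => simp at hm
  | cons a t ih =>
      rcases List.mem_cons.1 hm with rfl | hmt
      · have hnot : ∀ x ∈ t, p x = false := by
          intro x hx
          by_contra hpx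
          have := huniq x (List.mem_cons_of_mem _ hx) (by revert hpx; cases p x <;> simp)
          subst this
          exact (List.nodup_cons.1 hnd).1 hx
        have h0 : t.countP p = 0 := by
          rw [List.countP_eq_zero]
          intro x hx
          simp [hnot x hx]
        rw [List.countP_cons, h0]
        simp [hpm]
      · have ham : a ≠ m := by
          rintro rfl
          exact (List.nodup_cons.1 hnd).1 hmt
        have hpa : p a = false := by
          by_contra hpx
          exact ham (huniq a List.mem_cons_self (by revert hpx; cases p a <;> simp))
        rw [List.countP_cons]
        simp [hpa]
        exact ih (List.nodup_cons.1 hnd).2 hmt (fun x hx => huniq x (List.mem_cons_of_mem _ hx))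

-- ===== BFS (find_fence) correctness =====

lemma pvFindLoop_spec (Sd : List (Int × Int × (Int × Int))) (start : Int × Int × (Int × Int)) :
    ∀ (fuel : Nat) (fence tv sf : PySem.Set (Int × Int × (Int × Int))),
      fence.length < fuel →
      fence.Nodup → tv.Nodup → sf.Nodup →
      (∀ x ∈ tv, x ∈ fence) →
      (∀ x ∈ sf, x ∉ fence) →
      (∀ x, x ∈ Sd ↔ (x ∈ fence ∨ x ∈ sf)) →
      (start ∈ tv ∨ start ∈ sf) →
      (∀ x, (x ∈ tv ∨ x ∈ sf) → Relation.ReflTransGen (pvStep Sd) start x) →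
      (∀ f ∈ sf, ∀ g ∈ Sd, pvIsNeighbourFence f g = true → (g ∈ sf ∨ g ∈ tv)) →
      (start ∈ pvFindLoop fuel fence tv sf) ∧ (pvFindLoop fuel fence tv sf).Nodup ∧
        (∀ x ∈ pvFindLoop fuel fence tv sf, x ∈ Sd) ∧
        (∀ x ∈ pvFindLoop fuel fence tv sf, Relation.ReflTransGen (pvStep Sd) start x) ∧
        (∀ f ∈ pvFindLoop fuel fence tv sf, ∀ g ∈ Sd,
          pvIsNeighbourFence f g = true → g ∈ pvFindLoop fuel fence tv sf) := by
  intro fuel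
  induction fuel with
  | zero => intro fence tv sf hlt; exact absurd hlt (Nat.not_lt_zero _)
  | succ k ih =>
      intro fence tv sf hlt hndF hndT hndS htvF hsfF hSd hstart hreach hcl
      cases tv with
      | nil =>
          simp only [pvFindLoop]
          refine ⟨?_, hndS, ?_, ?_, ?_⟩
          · rcases hstart with h | h
            · simp at h
            · exact h
          · exact fun x hx => (hSd x).2 (Or.inr hx)
          · exact fun x hx => hreach x (Or.inr hx)
          · intro f hf g hg hadj
            rcases hcl f hf g hg hadj with h | h
            · exact h
            · simp at h
      | cons p rest =>
          simp only [pvFindLoop]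
          have hpF : p ∈ fence := htvF p List.mem_cons_self
          have hpns : p ∉ sf := fun h => hsfF p h hpF
          have hpnr : p ∉ rest := (List.nodup_cons.1 hndT).1
          have hmemF' : ∀ x, x ∈ PySem.Set.discard fence p ↔ x ∈ fence ∧ x ≠ p :=
            fun x => PySem.Set.mem_discard fence p x
          have hmemTV : ∀ x, x ∈ PySem.Set.update rest
              ((PySem.Set.discard fence p).filter (fun g => pvIsNeighbourFence p g)) ↔
              (x ∈ rest ∨ (x ∈ PySem.Set.discard fence p ∧ pvIsNeighbourFence p x = true)) := by
            intro x
            rw [PySem.Set.mem_update]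
            simp [List.mem_filter]
          have hmemSF : ∀ x, x ∈ PySem.Set.add sf p ↔ (x ∈ sf ∨ x = p) :=
            fun x => PySem.Set.mem_add sf p x
          have hlenF' : (PySem.Set.discard fence p).length < k := by
            have herase : PySem.Set.discard fence p = fence.erase p := by
              rw [List.Nodup.erase_eq_filter hndF]
              unfold PySem.Set.discard
              apply List.filter_congr
              intro x _
              simp [bne]
            rw [herase, List.length_erase_of_mem hpF]
            have : 1 ≤ fence.length := List.length_pos_of_mem hpF
            omega
          apply ih
          · exact hlenF'
          · exact PySem.Set.nodup_discard fence p hndF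
          · exact PySem.Set.nodup_update _ _ (List.nodup_cons.1 hndT).2
          · exact PySem.Set.nodup_add sf p hndS
          · -- to_visit ⊆ fence
            intro x hx
            rcases (hmemTV x).1 hx with hx | ⟨hx, _⟩
            · exact (hmemF' x).2 ⟨htvF x (List.mem_cons_of_mem _ hx), fun h => hpnr (h ▸ hx)⟩
            · exact hx
          · -- same_fence ∩ fence = ∅
            intro x hx
            rcases (hmemSF x).1 hx with hx | rfl
            · exact fun hc => hsfF x hx ((hmemF' x).1 hc).1
            · exact fun hc => ((hmemF' x).1 hc).2 rfl
          · -- Sd = fence ∪ same_fence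
            intro x
            rw [hSd x, hmemF' x, hmemSF x]
            by_cases hxp : x = p
            · subst hxp; simp [hpF]
            · simp [hxp]
          · -- start still pending or done
            rcases hstart with h | h
            · rcases List.mem_cons.1 h with rfl | h
              · exact Or.inr ((hmemSF _).2 (Or.inr rfl))
              · exact Or.inl ((hmemTV _).2 (Or.inl h))
            · exact Or.inr ((hmemSF _).2 (Or.inl h))
          · -- everything pending or done is reachable
            intro x hx
            rcases hx with hx | hx
            · rcases (hmemTV x).1 hx with hx | ⟨hx, hadj⟩
              · exact hreach x (Or.inl (List.mem_cons_of_mem _ hx))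
              · refine Relation.ReflTransGen.tail (hreach p (Or.inl List.mem_cons_self)) ?_
                exact ⟨(hSd p).2 (Or.inl hpF), (hSd x).2 (Or.inl ((hmemF' x).1 hx).1), hadj⟩
            · rcases (hmemSF x).1 hx with hx | rfl
              · exact hreach x (Or.inr hx)
              · exact hreach x (Or.inl List.mem_cons_self)
          · -- done elements have all their neighbours pending or done
            intro f hf g hg hadj
            rcases (hmemSF f).1 hf with hf | rfl
            · rcases hcl f hf g hg hadj with h | h
              · exact Or.inl ((hmemSF g).2 (Or.inl h))
              · rcases List.mem_cons.1 h with rfl | h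
                · exact Or.inl ((hmemSF g).2 (Or.inr rfl))
                · exact Or.inr ((hmemTV g).2 (Or.inl h))
            · rcases (hSd g).1 hg with hgf | hgs
              · have hgp : g ≠ f := pvAdj_ne hadj
                exact Or.inr ((hmemTV g).2 (Or.inr ⟨(hmemF' g).2 ⟨hgf, hgp⟩, hadj⟩))
              · exact Or.inl ((hmemSF g).2 (Or.inl hgs))

lemma pvFindFence_spec (S : List (Int × Int × (Int × Int))) (hS : S.Nodup)
    (f : Int × Int × (Int × Int)) (hf : f ∈ S) :
    f ∈ pvFindFence f.1 f.2.1 f.2.2 S ∧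
    (pvFindFence f.1 f.2.1 f.2.2 S).Nodup ∧
    (∀ x ∈ pvFindFence f.1 f.2.1 f.2.2 S, x ∈ S) ∧
    (∀ x ∈ pvFindFence f.1 f.2.1 f.2.2 S,
      Relation.ReflTransGen (pvStep (S.filter (fun g => g.2.2 == f.2.2))) f x) ∧
    (∀ x ∈ pvFindFence f.1 f.2.1 f.2.2 S, ∀ g ∈ S,
      pvIsNeighbourFence x g = true → g ∈ pvFindFence f.1 f.2.1 f.2.2 S) := by
  have hSdnd : (S.filter (fun g => g.2.2 == f.2.2)).Nodup := hS.filter _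
  have hfSd : f ∈ S.filter (fun g => g.2.2 == f.2.2) := List.mem_filter.2 ⟨hf, by simp⟩
  have hport : pvFindFence f.1 f.2.1 f.2.2 S =
      pvFindLoop ((S.filter (fun g => g.2.2 == f.2.2)).length + 1)
        (S.filter (fun g => g.2.2 == f.2.2)) [f] [] := by
    unfold pvFindFence
    rw [PySem.Set.ofList_eq_self_of_nodup _ hSdnd]
  have hspec := pvFindLoop_spec (S.filter (fun g => g.2.2 == f.2.2)) f
    ((S.filter (fun g => g.2.2 == f.2.2)).length + 1)
    (S.filter (fun g => g.2.2 == f.2.2)) [f] []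
    (Nat.lt_succ_self _) hSdnd (List.nodup_singleton f) List.nodup_nil
    (by intro x hx; rw [List.mem_singleton.1 hx]; exact hfSd)
    (by intro x hx; simp at hx)
    (by intro x; simp)
    (Or.inl (List.mem_singleton.2 rfl))
    (by
      intro x hx
      rcases hx with hx | hx
      · rw [List.mem_singleton] at hx
        subst hx
        exact Relation.ReflTransGen.refl
      · simp at hx)
    (by intro q hq; simp at hq)
  rw [hport]
  obtain ⟨h1, h2, h3, h4, h5⟩ := hspec
  refine ⟨h1, h2, fun x hx => (List.mem_filter.1 (h3 x hx)).1, h4, ?_⟩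
  -- closedness against all of S: a neighbour automatically has the right direction
  intro x hx g hg hadj
  have hxd : (pvEta x).2 = (pvEta f).2 := by rw [pvReach_eta (h4 x hx)]
  have hηxg := ((pvAdj_iff x g).1 hadj).1
  have hgd : g.2.2 = f.2.2 := by
    have : (pvEta g).2 = (pvEta f).2 := by rw [← hηxg]; exact hxd
    simpa [pvEta] using this
  exact h5 x hx g (List.mem_filter.2 ⟨hg, by simp [hgd]⟩) hadj

-- ===== counting =====

-- exactly one element of the component C has its successor outside S (the run's ξ-maximum)
lemma pvComponent_count (S C : List (Int × Int × (Int × Int))) (hS : S.Nodup)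
    (f : Int × Int × (Int × Int)) (hfC : f ∈ C)
    (hCS : ∀ x ∈ C, x ∈ S)
    (hreach : ∀ x ∈ C, Relation.ReflTransGen (pvStep (S.filter (fun g => g.2.2 == f.2.2))) f x)
    (hcl : ∀ x ∈ C, ∀ g ∈ S, pvIsNeighbourFence x g = true → g ∈ C) :
    List.countP (fun g => !(PySem.Set.contains S (pvSucc g)))
      (S.filter (fun x => PySem.Set.contains C x)) = 1 := by
  have hp : ∀ a : Int × Int × (Int × Int),
      ((!(PySem.Set.contains S (pvSucc a))) = true) ↔ pvSucc a ∉ S := by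
    intro a
    simp
  have hηC : ∀ x ∈ C, pvEta x = pvEta f := fun x hx => pvReach_eta (hreach x hx)
  have hL : ∀ x, x ∈ S.filter (fun x => PySem.Set.contains C x) ↔ x ∈ C := by
    intro x
    rw [List.mem_filter]
    constructor
    · exact fun h => (PySem.Set.contains_iff C x).1 h.2
    · exact fun h => ⟨hCS x h, (PySem.Set.contains_iff C x).2 h⟩
  obtain ⟨m, hmC, hmax⟩ := pvExists_max C (by rintro rfl; simp at hfC)
  -- the maximum's successor is absent
  have hpm : pvSucc m ∉ S := by
    intro hin
    have hadj : pvIsNeighbourFence m (pvSucc m) = true := by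
      rw [pvAdj_iff]
      obtain ⟨hη, hξ⟩ := (pvSucc_iff m (pvSucc m)).1 rfl
      exact ⟨hη.symm, Or.inl hξ⟩
    have := hmax (pvSucc m) (hcl m hmC (pvSucc m) hin hadj)
    have hξ := ((pvSucc_iff m (pvSucc m)).1 rfl).2
    omega
  -- every other element of C has its successor inside S
  have huniq : ∀ g ∈ C, pvSucc g ∉ S → g = m := by
    intro g hgC hgs
    by_contra hgm
    have hξlt : pvXi g < pvXi m := by
      rcases lt_or_eq_of_le (hmax g hgC) with h | h
      · exact h
      · exact absurd (pvEta_xi_inj ((hηC g hgC).trans (hηC m hmC).symm) h) hgm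
    have hchain : Relation.ReflTransGen (pvStep (S.filter (fun x => x.2.2 == f.2.2))) g m :=
      Relation.ReflTransGen.trans (pvReach_symm (hreach g hgC)) (hreach m hmC)
    have hgSd : g ∈ S.filter (fun x => x.2.2 == f.2.2) := by
      refine List.mem_filter.2 ⟨hCS g hgC, ?_⟩
      have := congrArg Prod.snd (hηC g hgC)
      simp [pvEta] at this
      simp [this]
    obtain ⟨c, hcS, hcη, hcξ⟩ := pvReach_ivt hchain (pvXi g + 1) (Or.inl ⟨by omega, by omega⟩) hgSd
    have hcg : c = pvSucc g := by
      rw [pvSucc_iff]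
      exact ⟨hcη.trans ((hηC m hmC).trans (hηC g hgC).symm), hcξ⟩
    rw [hcg] at hcS
    exact hgs (List.mem_filter.1 hcS).1
  apply pvCountP_eq_one (m := m) (hS.filter _) ((hL m).2 hmC) ((hp m).2 hpm)
  intro x hx hpx
  exact huniq x ((hL x).1 hx) ((hp x).1 hpx)

-- removing one whole component removes exactly one absent-successor witness
lemma pvCount_step (S C : List (Int × Int × (Int × Int))) (hS : S.Nodup)
    (f : Int × Int × (Int × Int)) (hfC : f ∈ C)
    (hCS : ∀ x ∈ C, x ∈ S)
    (hreach : ∀ x ∈ C, Relation.ReflTransGen (pvStep (S.filter (fun g => g.2.2 == f.2.2))) f x)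
    (hcl : ∀ x ∈ C, ∀ g ∈ S, pvIsNeighbourFence x g = true → g ∈ C) :
    List.countP (fun g => !(PySem.Set.contains S (pvSucc g))) S =
      1 + List.countP (fun g => !(PySem.Set.contains (PySem.Set.diff S C) (pvSucc g)))
            (PySem.Set.diff S C) := by
  have hdiff : PySem.Set.diff S C = S.filter (fun x => !(PySem.Set.contains C x)) := rfl
  have hsplit : List.countP (fun g => !(PySem.Set.contains S (pvSucc g))) S =
      List.countP (fun g => !(PySem.Set.contains S (pvSucc g)))
        (S.filter (fun x => PySem.Set.contains C x)) +
      List.countP (fun g => !(PySem.Set.contains S (pvSucc g)))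
        (S.filter (fun x => !(PySem.Set.contains C x))) := by
    rw [List.countP_eq_length_filter, List.countP_eq_length_filter, List.countP_eq_length_filter,
      List.filter_comm, List.filter_comm _ (fun x => !(PySem.Set.contains C x))]
    exact (List.length_eq_length_filter_add (l := S.filter (fun g => !PySem.Set.contains S (pvSucc g))) (fun x => PySem.Set.contains C x))
  rw [hsplit, pvComponent_count S C hS f hfC hCS hreach hcl, hdiff]
  congr 1
  -- on the remainder, membership of the successor in S and in S \ C coincide
  apply List.countP_congr
  intro x hx
  have hxS : x ∈ S := (List.mem_filter.1 hx).1
  have hxC : x ∉ C := by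
    have := (List.mem_filter.1 hx).2
    simpa [PySem.Set.contains_iff] using this
  have key : pvSucc x ∈ S → pvSucc x ∉ C := by
    intro hsS hsC
    have hadj : pvIsNeighbourFence (pvSucc x) x = true := by
      rw [pvAdj_iff]
      obtain ⟨hη, hξ⟩ := (pvSucc_iff x (pvSucc x)).1 rfl
      exact ⟨hη, Or.inr (by omega)⟩
    exact hxC (hcl (pvSucc x) hsC x hxS hadj)
  have hmem : (pvSucc x ∈ S.filter (fun y => !(PySem.Set.contains C y))) ↔ pvSucc x ∈ S := by
    rw [List.mem_filter]
    constructor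
    · exact fun h => h.1
    · intro h
      refine ⟨h, ?_⟩
      have := key h
      simpa [PySem.Set.contains_iff] using this
  have hcb : PySem.Set.contains (S.filter (fun y => !(PySem.Set.contains C y))) (pvSucc x) =
      PySem.Set.contains S (pvSucc x) := by
    rw [Bool.eq_iff_iff, PySem.Set.contains_iff, PySem.Set.contains_iff]
    exact hmem
  rw [hcb]

lemma pvNbLoop_eq_countP :
    ∀ (fuel : Nat) (S : PySem.Set (Int × Int × (Int × Int))), S.Nodup → S.length < fuel →
      pvNbLoop fuel S = (List.countP (fun g => !(PySem.Set.contains S (pvSucc g))) S : Int) := by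
  intro fuel
  induction fuel with
  | zero => intro S _ hlt; exact absurd hlt (Nat.not_lt_zero _)
  | succ k ih =>
      intro S hnd hlt
      cases S with
      | nil => simp [pvNbLoop]
      | cons f rest =>
          simp only [pvNbLoop]
          obtain ⟨h1, _, h3, h4, h5⟩ :=
            pvFindFence_spec (f :: rest) hnd f List.mem_cons_self
          have hstep := pvCount_step (f :: rest) (pvFindFence f.1 f.2.1 f.2.2 (f :: rest)) hnd
            f h1 h3 h4 h5
          have hlen : (PySem.Set.diff (f :: rest) (pvFindFence f.1 f.2.1 f.2.2 (f :: rest))).length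
              < k := by
            have hflt : (PySem.Set.diff (f :: rest)
                (pvFindFence f.1 f.2.1 f.2.2 (f :: rest))).length < (f :: rest).length := by
              apply List.length_filter_lt_length_iff_exists.2
              exact ⟨f, List.mem_cons_self, by simp [h1]⟩
            have hlc : (f :: rest).length = rest.length + 1 := rfl
            omega
          rw [ih _ (PySem.Set.nodup_diff _ _ hnd) hlen, hstep]
          push_cast
          ring

-- ===== VERDICT (by name: the statement is the Claim_ definition above) =====
theorem nb_sides_spec : Claim_equal_nb_sides := by
  intro fences _
  unfold Spec_nb_sides nb_sides nb_sides_alt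
  have hnd := PySem.Set.nodup_ofList (α := Int × Int × (Int × Int)) fences
  rw [pvNbLoop_eq_countP _ _ hnd (Nat.lt_succ_self _)]
  rw [PySem.List.foldl_count_if]
  simp
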